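-- pv_equiv track=rewrite | github.com/BoudewijnKlijn/competitive_programming | adventofcode/2021/d17.py | determine_valid_starting_velocities
-- ===== SOURCE A (Python) =====
-- from collections import defaultdict
--
-- def determine_valid_starting_velocities(minimum: int, maximum: int, is_x: bool):
--     """X velocity decreases or increases with 1 per step towards 0.
--     Y velocity always decreases with 1 per step.
--     We can determine all x starting velocities that:
--     - stay on an x goal coordinate forever
--     - are on an x goal coordinate for a single step
--     Both are fine:
--     - if forever, it can accommodate many y starting velocities
--     - if one step, then the number of steps must match a specific y starting velocity that is in the grid after the same
--     number of steps."""
--     valid_starting_velocities_for_n_steps = defaultdict(set)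
--     for goal in range(minimum, maximum + 1):
--         if is_x:
--             starting_velocity_step = -1 if goal > 0 else 1
--             starting_velocity_start = goal
--             starting_velocity_stop = 0
--         else:
--             starting_velocity_step = -1
--             starting_velocity_start = max(abs(minimum) + 1, abs(minimum) + 1)  # todo: this may not be correct. can increase this a lot and it still runs fast
--             starting_velocity_stop = min(0, goal-1)
--         for starting_velocity in range(starting_velocity_start, starting_velocity_stop, starting_velocity_step):
--             # how many steps do we need to get to the goal?
--             n_steps = 0
--             position = 0
--             velocity = starting_velocity
--             while (is_x and abs(position) <= abs(goal)) or (not is_x and position >= goal):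
--                 # keep iterating:
--                 # for x as long as position is between start and goal
--                 # for y as long as y is larger than goal
--                 n_steps += 1
--                 position += velocity
--                 if is_x:
--                     velocity = velocity - 1 if velocity > 0 else velocity + 1
--                 else:
--                     velocity -= 1
--                 if position == goal:
--                     # we found a valid starting velocity
--                     valid_starting_velocities_for_n_steps[n_steps].add(starting_velocity)
--                     break
--                 if is_x and velocity == 0:
--                     # if we are not yet at the goal, but have reached x velocity of zero, we can't get there
--                     break
--     return valid_starting_velocities_for_n_steps
-- ===== SOURCE B (Python) =====
-- from collections import defaultdict
--
--
-- def determine_valid_starting_velocities(minimum: int, maximum: int, is_x: bool):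
--     """Closed-form rewrite: for each goal, enumerate the step count n directly and
--     solve n*v - n*(n-1)/2 = goal for the starting velocity v, instead of simulating
--     every candidate starting velocity step by step."""
--     result = defaultdict(set)
--     for goal in range(minimum, maximum + 1):
--         if is_x:
--             if goal > 0:
--                 # v > 0 decays to 0; position after n steps (n <= v) is n*v - n*(n-1)/2
--                 for n in range(1, goal + 1):
--                     num = goal + n * (n - 1) // 2
--                     if num % n == 0:
--                         v = num // n
--                         if v >= n:
--                             result[n].add(v)
--             elif goal < 0:
--                 # mirror image: v < 0 grows to 0; position after n steps is n*v + n*(n-1)/2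
--                 for n in range(1, -goal + 1):
--                     num = goal - n * (n - 1) // 2
--                     if num % n == 0:
--                         v = num // n
--                         if v <= -n:
--                             result[n].add(v)
--         elif goal <= 0:
--             # y: the probe starts at 0 and is only tracked while position >= goal,
--             # so a goal above 0 never records a hit; position after n steps is
--             # n*v - n*(n-1)/2, and only velocities up to abs(minimum)+1 are candidates
--             cap = abs(minimum) + 1
--             for n in range(2 * cap + 1, 0, -1):
--                 num = goal + n * (n - 1) // 2
--                 if num % n == 0:
--                     v = num // n
--                     if v <= cap:
--                         result[n].add(v)
--     return result
-- ===== Notes on version B (the rewrite author's own statement) =====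
-- stated objective: alternative
-- what changed: Instead of simulating every candidate starting velocity step by step for every goal coordinate, B enumerates for each goal the possible step counts n and solves the closed-form position equation n*v - n*(n-1)/2 = goal (a divisibility test) for the starting velocity, emitting exactly the same (step-count, velocity) records in the same order.
import Mathlib
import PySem

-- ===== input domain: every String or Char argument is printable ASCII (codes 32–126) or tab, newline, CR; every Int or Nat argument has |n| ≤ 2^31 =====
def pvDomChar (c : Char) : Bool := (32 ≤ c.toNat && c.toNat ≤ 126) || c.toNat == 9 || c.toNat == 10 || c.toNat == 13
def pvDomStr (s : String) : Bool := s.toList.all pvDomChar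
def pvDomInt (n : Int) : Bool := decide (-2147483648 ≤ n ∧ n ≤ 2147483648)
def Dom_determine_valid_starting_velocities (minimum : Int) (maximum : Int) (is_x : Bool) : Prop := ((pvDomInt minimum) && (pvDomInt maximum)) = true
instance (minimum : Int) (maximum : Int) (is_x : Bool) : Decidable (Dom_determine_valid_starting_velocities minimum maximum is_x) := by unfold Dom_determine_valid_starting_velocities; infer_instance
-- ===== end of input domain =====

-- B replaces A's per-(goal, velocity) step-by-step simulation by, per goal, solving the
-- closed-form position equation n*v - n*(n-1)/2 = goal for the starting velocity v directly.

-- ===== PORT A =====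
def pvTrack (d : PySem.Dict Int (PySem.Set Int)) (n v : Int) : PySem.Dict Int (PySem.Set Int) :=
  d.modify n PySem.Set.empty (fun s => PySem.Set.add s v)

def pvSimLoop (is_x : Bool) (goal : Int) : Nat → Int → Int → Int → Option Int
  | 0, _, _, _ => none
  | fuel+1, n, pos, v =>
    if (is_x && decide (|pos| ≤ |goal|)) || (!is_x && decide (goal ≤ pos)) then
      let n' := n + 1
      let pos' := pos + v
      let v' := if is_x then (if 0 < v then v - 1 else v + 1) else v - 1
      if pos' = goal then some n'
      else if is_x && v' == 0 then none
      else pvSimLoop is_x goal fuel n' pos' v'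
    else none

def determine_valid_starting_velocities (minimum : Int) (maximum : Int) (is_x : Bool) : List (Int × List Int) :=
  ((PySem.List.pyRange minimum (maximum + 1) 1).foldl (fun d goal =>
      let step : Int := if is_x then (if 0 < goal then -1 else 1) else -1
      let start : Int := if is_x then goal else max (|minimum| + 1) (|minimum| + 1)
      let stop : Int := if is_x then 0 else min 0 (goal - 1)
      (PySem.List.pyRange start stop step).foldl (fun d sv =>
          match pvSimLoop is_x goal (2 * sv.natAbs + 2 * goal.natAbs + 3) 0 0 sv with
          | some n => pvTrack d n sv
          | none => d) d)
    PySem.Dict.empty).items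

-- ===== PORT B =====
def determine_valid_starting_velocities_alt (minimum : Int) (maximum : Int) (is_x : Bool) : List (Int × List Int) :=
  ((PySem.List.pyRange minimum (maximum + 1) 1).foldl (fun d goal =>
      if is_x then
        if 0 < goal then
          (PySem.List.pyRange 1 (goal + 1) 1).foldl (fun d n =>
              let num := goal + PySem.Int.floordiv (n * (n - 1)) 2
              if PySem.Int.mod num n = 0 then
                let v := PySem.Int.floordiv num n
                if n ≤ v then pvTrack d n v else d
              else d) d
        else if goal < 0 then
          (PySem.List.pyRange 1 (-goal + 1) 1).foldl (fun d n =>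
              let num := goal - PySem.Int.floordiv (n * (n - 1)) 2
              if PySem.Int.mod num n = 0 then
                let v := PySem.Int.floordiv num n
                if v ≤ -n then pvTrack d n v else d
              else d) d
        else d
      else if goal ≤ 0 then
        let cap := |minimum| + 1
        (PySem.List.pyRange (2 * cap + 1) 0 (-1)).foldl (fun d n =>
            let num := goal + PySem.Int.floordiv (n * (n - 1)) 2
            if PySem.Int.mod num n = 0 then
              let v := PySem.Int.floordiv num n
              if v ≤ cap then pvTrack d n v else d
            else d) d
      else d)
    PySem.Dict.empty).items

-- ===== PRECONDITION & SPEC =====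
def Spec_determine_valid_starting_velocities (minimum : Int) (maximum : Int) (is_x : Bool) (out : List (Int × List Int)) : Prop := out = determine_valid_starting_velocities_alt minimum maximum is_x
instance (minimum : Int) (maximum : Int) (is_x : Bool) (out : List (Int × List Int)) : Decidable (Spec_determine_valid_starting_velocities minimum maximum is_x out) := by unfold Spec_determine_valid_starting_velocities; infer_instance

-- ===== CLAIM (what is proved, stated in full; the proofs are below) =====
def Claim_equal_determine_valid_starting_velocities : Prop := ∀ (minimum : Int) (maximum : Int) (is_x : Bool), Dom_determine_valid_starting_velocities minimum maximum is_x → Spec_determine_valid_starting_velocities minimum maximum is_x (determine_valid_starting_velocities minimum maximum is_x)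

-- ===== LEMMAS AND PROOFS =====
theorem pvSimX_sound (g sv : Int) : ∀ (fuel : Nat) (k pos v n : Int),
    v = sv - k → 2*pos = k*(2*sv - k + 1) → 0 ≤ k → k < sv →
    pvSimLoop true g fuel k pos v = some n →
    k < n ∧ n ≤ sv ∧ 2*g = n*(2*sv - n + 1) := by
  intro fuel
  induction fuel with
  | zero => intro k pos v n _ _ _ _ h; simp [pvSimLoop] at h
  | succ f ih =>
    intro k pos v n hv hpos hk hksv h
    have hvpos : (0:Int) < v := by omega
    simp only [pvSimLoop, Bool.true_and, Bool.false_and, Bool.or_false, Bool.not_true,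
      hvpos, if_true, decide_true] at h
    by_cases hc : |pos| ≤ |g|
    · simp only [hc, decide_true, if_true] at h
      by_cases hhit : pos + v = g
      · simp only [hhit, if_true, Option.some.injEq] at h
        refine ⟨by omega, by omega, ?_⟩
        subst h
        linear_combination (-2)*hhit + hpos + 2*hv
      · simp only [hhit, if_false] at h
        by_cases hz : v - 1 = 0
        · simp [hz] at h
        · simp only [hz, beq_iff_eq, if_false, Bool.true_and, if_neg] at h
          have := ih (k+1) (pos+v) (v-1) n (by omega) (by linear_combination hpos + 2*hv) (by omega) (by omega) h
          exact ⟨by omega, this.2.1, this.2.2⟩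
    · simp [hc] at h

theorem pvSimX_complete (g sv : Int) : ∀ (fuel : Nat) (k pos v n : Int),
    v = sv - k → 2*pos = k*(2*sv - k + 1) → 0 ≤ k → k < n → n ≤ sv →
    2*g = n*(2*sv - n + 1) → 1 ≤ g → (n - k).toNat ≤ fuel →
    pvSimLoop true g fuel k pos v = some n := by
  intro fuel
  induction fuel with
  | zero => intro k pos v n _ _ _ _ _ _ _ hf; omega
  | succ f ih =>
    intro k pos v n hv hpos hk hkn hnsv heq hg hf
    have hvpos : (0:Int) < v := by omega
    have hpos0 : (0:Int) ≤ pos := by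
      nlinarith [mul_nonneg hk (show (0:Int) ≤ 2*sv - k + 1 by omega)]
    have hposlt : pos < g := by
      nlinarith [mul_pos (show (0:Int) < n - k by omega) (show (0:Int) < 2*sv + 1 - n - k by omega)]
    have hc : |pos| ≤ |g| := by
      rw [abs_of_nonneg hpos0, abs_of_nonneg (by omega : (0:Int) ≤ g)]; omega
    rw [pvSimLoop]
    simp only [Bool.true_and, Bool.false_and, Bool.or_false, hc, decide_true, if_true, hvpos,
      Bool.not_true]
    by_cases hhit : k + 1 = n
    · subst hhit
      have h2 : 2*(pos + v) = 2*g := by linear_combination hpos + 2*hv - heq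
      have : pos + v = g := by omega
      simp [this]
    · have hne : pos + v ≠ g := by
        intro hEq
        have hroot : 2*g = (k+1)*(2*sv - k) := by linear_combination (-2)*hEq + hpos + 2*hv
        nlinarith [mul_pos (show (0:Int) < n - (k+1) by omega)
          (show (0:Int) < 2*sv + 1 - n - (k+1) by omega)]
      have hz' : ((v - 1 : Int) == 0) = false := by rw [beq_eq_false_iff_ne]; omega
      simp only [hne, if_false, hz', Bool.and_false, Bool.false_eq_true]
      exact ih (k+1) (pos+v) (v-1) n (by omega) (by linear_combination hpos + 2*hv) (by omega)
        (by omega) hnsv heq hg (by omega)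

theorem pvSimX_iff (g sv n : Int) (hsv : 1 ≤ sv) (hg : 1 ≤ g) :
    pvSimLoop true g (2 * sv.natAbs + 2 * g.natAbs + 3) 0 0 sv = some n
      ↔ (1 ≤ n ∧ n ≤ sv ∧ 2*g = n*(2*sv - n + 1)) := by
  constructor
  · intro h
    have := pvSimX_sound g sv _ 0 0 sv n (by ring) (by ring) le_rfl (by omega) h
    exact ⟨by omega, this.2.1, this.2.2⟩
  · rintro ⟨h1, h2, h3⟩
    exact pvSimX_complete g sv _ 0 0 sv n (by ring) (by ring) le_rfl (by omega) h2 h3 hg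
      (by omega)

theorem pvSim_mirror (g : Int) : ∀ (fuel : Nat) (k pos v : Int), v ≠ 0 →
    pvSimLoop true g fuel k pos v = pvSimLoop true (-g) fuel k (-pos) (-v) := by
  intro fuel
  induction fuel with
  | zero => intro k pos v _; rfl
  | succ f ih =>
    intro k pos v hv
    rw [pvSimLoop, pvSimLoop]
    simp only [Bool.true_and, Bool.false_and, Bool.or_false, Bool.not_true, abs_neg]
    by_cases hc : |pos| ≤ |g|
    · simp only [hc, decide_true, if_true]
      by_cases hvpos : (0:Int) < v
      · simp only [hvpos, if_true, show ¬ (0:Int) < -v by omega, if_false]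
        by_cases hhit : pos + v = g
        · simp [hhit, show -pos + -v = -g by omega]
        · simp only [hhit, if_false, show ¬ (-pos + -v = -g) by omega, if_false]
          by_cases hz : v - 1 = 0
          · simp [hz, show -v + 1 = 0 by omega]
          · have h1 : ((v - 1 : Int) == 0) = false := by rw [beq_eq_false_iff_ne]; omega
            have h2 : ((-v + 1 : Int) == 0) = false := by rw [beq_eq_false_iff_ne]; omega
            simp only [h1, h2, Bool.and_false, Bool.false_eq_true, if_false]
            rw [show (-pos + -v : Int) = -(pos + v) by ring, show (-v + 1 : Int) = -(v - 1) by ring]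
            exact ih (k+1) (pos+v) (v-1) (by omega)
      · simp only [hvpos, if_false, show (0:Int) < -v by omega, if_true]
        by_cases hhit : pos + v = g
        · simp [hhit, show -pos + -v = -g by omega]
        · simp only [hhit, if_false, show ¬ (-pos + -v = -g) by omega, if_false]
          by_cases hz : v + 1 = 0
          · simp [hz, show -v - 1 = 0 by omega]
          · have h1 : ((v + 1 : Int) == 0) = false := by rw [beq_eq_false_iff_ne]; omega
            have h2 : ((-v - 1 : Int) == 0) = false := by rw [beq_eq_false_iff_ne]; omega
            simp only [h1, h2, Bool.and_false, Bool.false_eq_true, if_false]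
            rw [show (-pos + -v : Int) = -(pos + v) by ring, show (-v - 1 : Int) = -(v + 1) by ring]
            exact ih (k+1) (pos+v) (v+1) (by omega)
    · simp [hc]

theorem pvSimXneg_iff (g sv n : Int) (hsv : sv ≤ -1) (hg : g ≤ -1) :
    pvSimLoop true g (2 * sv.natAbs + 2 * g.natAbs + 3) 0 0 sv = some n
      ↔ (1 ≤ n ∧ n ≤ -sv ∧ 2*g = n*(2*sv + n - 1)) := by
  rw [pvSim_mirror g _ 0 0 sv (by omega), neg_zero,
    show (2 * sv.natAbs + 2 * g.natAbs + 3) = (2 * (-sv).natAbs + 2 * (-g).natAbs + 3) by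
      simp [Int.natAbs_neg],
    pvSimX_iff (-g) (-sv) n (by omega) (by omega)]
  refine and_congr_right fun _ => and_congr_right fun _ => ⟨fun h => by linear_combination -h,
    fun h => by linear_combination -h⟩

theorem pvSimY_sound (g sv : Int) : ∀ (fuel : Nat) (k pos v n : Int),
    v = sv - k → 2*pos = k*(2*sv - k + 1) → 0 ≤ k →
    pvSimLoop false g fuel k pos v = some n →
    k < n ∧ 2*g = n*(2*sv - n + 1) := by
  intro fuel
  induction fuel with
  | zero => intro k pos v n _ _ _ h; simp [pvSimLoop] at h
  | succ f ih =>
    intro k pos v n hv hpos hk h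
    simp only [pvSimLoop, Bool.true_and, Bool.false_and, Bool.false_or, Bool.not_false,
      Bool.false_and, if_false, Bool.false_eq_true] at h
    by_cases hc : g ≤ pos
    · simp only [hc, decide_true, if_true] at h
      by_cases hhit : pos + v = g
      · simp only [hhit, if_true, Option.some.injEq] at h
        subst h
        exact ⟨by omega, by linear_combination (-2)*hhit + hpos + 2*hv⟩
      · simp only [hhit, if_false] at h
        have := ih (k+1) (pos+v) (v-1) n (by omega) (by linear_combination hpos + 2*hv)
          (by omega) h
        exact ⟨by omega, this.2⟩
    · simp [hc] at h

theorem pvSimY_complete (g sv : Int) : ∀ (fuel : Nat) (k pos v n : Int),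
    v = sv - k → 2*pos = k*(2*sv - k + 1) → 0 ≤ k → k < n →
    2*g = n*(2*sv - n + 1) → g ≤ 0 → (n - k).toNat ≤ fuel →
    pvSimLoop false g fuel k pos v = some n := by
  intro fuel
  induction fuel with
  | zero => intro k pos v n _ _ _ _ _ _ hf; omega
  | succ f ih =>
    intro k pos v n hv hpos hk hkn heq hg hf
    have hn2sv : 2*sv + 1 ≤ n := by
      by_contra hcon
      push_neg at hcon
      nlinarith [mul_pos (show (0:Int) < n by omega) (show (0:Int) < 2*sv - n + 1 by omega)]
    have hc : g ≤ pos := by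
      nlinarith [mul_nonneg (show (0:Int) ≤ n - k by omega)
        (show (0:Int) ≤ n + k - (2*sv+1) by omega)]
    rw [pvSimLoop]
    simp only [Bool.true_and, Bool.false_and, Bool.false_or, Bool.not_false, hc, decide_true,
      if_true, if_false, Bool.false_eq_true]
    by_cases hhit : k + 1 = n
    · subst hhit
      have h2 : 2*(pos + v) = 2*g := by linear_combination hpos + 2*hv - heq
      have : pos + v = g := by omega
      simp [this]
    · have hne : pos + v ≠ g := by
        intro hEq
        have hroot : 2*g = (k+1)*(2*sv - k) := by linear_combination (-2)*hEq + hpos + 2*hv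
        nlinarith [mul_pos (show (0:Int) < n - (k+1) by omega)
          (show (0:Int) < n + (k+1) - (2*sv+1) by omega)]
      simp only [hne, if_false]
      exact ih (k+1) (pos+v) (v-1) n (by omega) (by linear_combination hpos + 2*hv) (by omega)
        (by omega) heq hg (by omega)

theorem pvSimY_iff (g sv n : Int) (hg : g ≤ 0) :
    pvSimLoop false g (2 * sv.natAbs + 2 * g.natAbs + 3) 0 0 sv = some n
      ↔ (1 ≤ n ∧ 2*g = n*(2*sv - n + 1)) := by
  constructor
  · intro h
    have := pvSimY_sound g sv _ 0 0 sv n (by ring) (by ring) le_rfl h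
    exact ⟨by omega, this.2⟩
  · rintro ⟨h1, h2⟩
    have hn2sv : 2*sv + 1 ≤ n := by
      by_contra hcon
      push_neg at hcon
      nlinarith [mul_pos (show (0:Int) < n by omega) (show (0:Int) < 2*sv - n + 1 by omega)]
    have hbound : n ≤ 2*sv + 1 ∨ n ≤ -2*g := by
      rcases le_or_gt n (2*sv+1) with h | h
      · exact Or.inl h
      · right
        nlinarith [mul_le_mul_of_nonneg_left (show (1:Int) ≤ n - 2*sv - 1 by omega)
          (show (0:Int) ≤ n by omega)]
    exact pvSimY_complete g sv _ 0 0 sv n (by ring) (by ring) le_rfl (by omega) h2 hg (by omega)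

-- ---- closed-form side: integer arithmetic helpers ----

theorem pvSimY_none (g sv : Int) (hg : 1 ≤ g) (fuel : Nat) :
    pvSimLoop false g fuel 0 0 sv = none := by
  cases fuel with
  | zero => rfl
  | succ f => simp [pvSimLoop, show ¬ (g ≤ (0:Int)) by omega]

theorem pv_two_fdiv (n : Int) : 2 * PySem.Int.floordiv (n*(n-1)) 2 = n*(n-1) := by
  have h : (2:Int) ∣ n*(n-1) := by
    have := (Int.even_mul_succ_self (n-1)).two_dvd
    simpa [mul_comm] using this
  simpa [PySem.Int.floordiv] using Int.mul_fdiv_cancel' h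

theorem pv_mul_fdiv (n v : Int) (hn : n ≠ 0) : PySem.Int.floordiv (n*v) n = v := by
  simpa [PySem.Int.floordiv] using Int.mul_fdiv_cancel_left v hn

theorem pv_mul_fmod (n v : Int) : PySem.Int.mod (n*v) n = 0 := by
  simpa [PySem.Int.mod] using Int.mul_fmod_right n v

theorem pv_fdiv_exact (num n : Int) (h : PySem.Int.mod num n = 0) :
    n * PySem.Int.floordiv num n = num := by
  have h2 := Int.fdiv_add_fmod num n
  simp only [PySem.Int.mod] at h
  simp only [PySem.Int.floordiv]
  omega

-- ---- bounds and order facts about the hit equation ----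
theorem pvC_xpos_bounds (g n sv : Int) (h1 : 1 ≤ n) (h2 : n ≤ sv)
    (he : 2*g = n*(2*sv - n + 1)) : n ≤ g ∧ sv ≤ g := by
  constructor
  · nlinarith [mul_nonneg (show (0:Int) ≤ n by omega) (show (0:Int) ≤ 2*sv - n - 1 by omega)]
  · nlinarith [mul_nonneg (show (0:Int) ≤ n - 1 by omega) (show (0:Int) ≤ sv - n by omega),
      mul_nonneg (show (0:Int) ≤ n - 1 by omega) (show (0:Int) ≤ sv by omega)]

theorem pv_anti_xpos (g n sv n' sv' : Int) (h1 : 1 ≤ n) (h2 : n ≤ sv)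
    (he : 2*g = n*(2*sv - n + 1)) (h1' : 1 ≤ n') (h2' : n' ≤ sv')
    (he' : 2*g = n'*(2*sv' - n' + 1)) (hlt : sv' < sv) : n < n' := by
  by_contra hcon
  push_neg at hcon
  nlinarith [mul_nonneg (show (0:Int) ≤ n - n' by omega)
      (show (0:Int) ≤ 2*sv + 1 - n - n' by omega),
    mul_le_mul_of_nonneg_left (show (1:Int) ≤ sv - sv' by omega) (show (0:Int) ≤ n' by omega)]

theorem pvY_root_lb (g sv n : Int) (h1 : 1 ≤ n) (hg : g ≤ 0)
    (he : 2*g = n*(2*sv - n + 1)) : 2*sv + 1 ≤ n := by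
  by_contra hcon
  push_neg at hcon
  nlinarith [mul_pos (show (0:Int) < n by omega) (show (0:Int) < 2*sv - n + 1 by omega)]

theorem pvC_y_lb (g sv n : Int) (h1 : 1 ≤ n) (hg : g ≤ 0)
    (he : 2*g = n*(2*sv - n + 1)) : g ≤ sv := by
  have hlb := pvY_root_lb g sv n h1 hg he
  nlinarith [mul_nonneg (show (0:Int) ≤ n - 1 by omega)
    (show (0:Int) ≤ n - (2*sv + 1) by omega)]

theorem pvY_n_ub (g sv n : Int) (h1 : 1 ≤ n) (hg : g ≤ 0)
    (he : 2*g = n*(2*sv - n + 1)) : n ≤ 2*sv + 1 ∨ n ≤ -2*g := by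
  have hlb := pvY_root_lb g sv n h1 hg he
  rcases le_or_gt n (2*sv+1) with h | h
  · exact Or.inl h
  · right
    nlinarith [mul_le_mul_of_nonneg_left (show (1:Int) ≤ n - 2*sv - 1 by omega)
      (show (0:Int) ≤ n by omega)]

theorem pv_mono_y (g n sv n' sv' : Int) (h1 : 1 ≤ n) (he : 2*g = n*(2*sv - n + 1))
    (h1' : 1 ≤ n') (he' : 2*g = n'*(2*sv' - n' + 1)) (hg : g ≤ 0) (hlt : sv' < sv) :
    n' < n := by
  have hlb := pvY_root_lb g sv n h1 hg he
  have hlb' := pvY_root_lb g sv' n' h1' hg he'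
  by_contra hcon
  push_neg at hcon
  nlinarith [mul_nonneg (show (0:Int) ≤ n' - n by omega)
      (show (0:Int) ≤ n + n' - (2*sv + 1) by omega),
    mul_le_mul_of_nonneg_left (show (1:Int) ≤ sv - sv' by omega) (show (0:Int) ≤ n' by omega)]

-- ---- per-goal event streams ----

def pvGA (is_x : Bool) (g sv : Int) : Option (Int × Int) :=
  (pvSimLoop is_x g (2 * sv.natAbs + 2 * g.natAbs + 3) 0 0 sv).map (fun n => (n, sv))

def pvGBxpos (g n : Int) : Option (Int × Int) :=
  if PySem.Int.mod (g + PySem.Int.floordiv (n*(n-1)) 2) n = 0 then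
    (if n ≤ PySem.Int.floordiv (g + PySem.Int.floordiv (n*(n-1)) 2) n then
      some (n, PySem.Int.floordiv (g + PySem.Int.floordiv (n*(n-1)) 2) n)
    else none)
  else none

theorem pvGBxpos_iff (g n : Int) (p : Int × Int) (hn : 1 ≤ n) :
    pvGBxpos g n = some p ↔ (p.1 = n ∧ n ≤ p.2 ∧ 2*g = n*(2*p.2 - n + 1)) := by
  unfold pvGBxpos
  constructor
  · intro h
    split_ifs at h with hmod hle
    · rw [Option.some.injEq] at h
      subst h
      have hex := pv_fdiv_exact (g + PySem.Int.floordiv (n*(n-1)) 2) n hmod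
      have htri := pv_two_fdiv n
      exact ⟨rfl, hle, by linear_combination -2*hex - htri⟩
  · rintro ⟨hp1, hle, he⟩
    have htri := pv_two_fdiv n
    have hnum : g + PySem.Int.floordiv (n*(n-1)) 2 = n * p.2 := by nlinarith
    rw [hnum, if_pos (pv_mul_fmod n p.2), pv_mul_fdiv n p.2 (by omega),
      if_pos hle, ← hp1]

theorem pv_events_xpos (g : Int) (hg : 0 < g) :
    (PySem.List.pyRange g 0 (-1)).filterMap (pvGA true g)
      = (PySem.List.pyRange 1 (g+1) 1).filterMap (pvGBxpos g) := by
  have memL : ∀ p : Int × Int, p ∈ (PySem.List.pyRange g 0 (-1)).filterMap (pvGA true g) ↔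
      (1 ≤ p.1 ∧ p.1 ≤ p.2 ∧ 2*g = p.1*(2*p.2 - p.1 + 1)) := by
    intro p
    rw [List.mem_filterMap]
    constructor
    · rintro ⟨sv, hsv, hf⟩
      rw [PySem.List.mem_pyRange_neg_one] at hsv
      unfold pvGA at hf
      rw [Option.map_eq_some_iff] at hf
      obtain ⟨n, hsim, hp⟩ := hf
      rw [pvSimX_iff g sv n (by omega) (by omega)] at hsim
      subst hp
      exact ⟨hsim.1, hsim.2.1, hsim.2.2⟩
    · rintro ⟨h1, h2, h3⟩
      have hb := pvC_xpos_bounds g p.1 p.2 h1 h2 h3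
      refine ⟨p.2, PySem.List.mem_pyRange_neg_one.mpr ⟨by omega, by omega⟩, ?_⟩
      unfold pvGA
      rw [Option.map_eq_some_iff]
      exact ⟨p.1, (pvSimX_iff g p.2 p.1 (by omega) (by omega)).mpr ⟨h1, h2, h3⟩, rfl⟩
  have memR : ∀ p : Int × Int, p ∈ (PySem.List.pyRange 1 (g+1) 1).filterMap (pvGBxpos g) ↔
      (1 ≤ p.1 ∧ p.1 ≤ p.2 ∧ 2*g = p.1*(2*p.2 - p.1 + 1)) := by
    intro p
    rw [List.mem_filterMap]
    constructor
    · rintro ⟨n, hn, hf⟩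
      rw [PySem.List.mem_pyRange_one] at hn
      rw [pvGBxpos_iff g n p (by omega)] at hf
      obtain ⟨hp1, hle, he⟩ := hf
      exact ⟨by omega, by omega, by rw [hp1]; linear_combination he⟩
    · rintro ⟨h1, h2, h3⟩
      have hb := pvC_xpos_bounds g p.1 p.2 h1 h2 h3
      refine ⟨p.1, PySem.List.mem_pyRange_one.mpr ⟨by omega, by omega⟩, ?_⟩
      exact (pvGBxpos_iff g p.1 p (by omega)).mpr ⟨rfl, h2, h3⟩
  have pairL : ((PySem.List.pyRange g 0 (-1)).filterMap (pvGA true g)).Pairwise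
      (fun p q => p.1 < q.1) := by
    rw [List.pairwise_filterMap]
    have base : (PySem.List.pyRange g 0 (-1)).Pairwise (fun a b => b < a) := by
      rw [PySem.List.pyRange_neg_one_eq_reverse, List.pairwise_reverse]
      exact PySem.List.pairwise_lt_pyRange_one _ _
    refine (List.Pairwise.and_mem.mp base).imp ?_
    rintro a b ⟨ha, hb, hab⟩ p hp q hq
    rw [PySem.List.mem_pyRange_neg_one] at ha hb
    unfold pvGA at hp hq
    rw [Option.map_eq_some_iff] at hp hq
    obtain ⟨n, hsim, hpe⟩ := hp
    obtain ⟨n', hsim', hqe⟩ := hq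
    rw [pvSimX_iff g a n (by omega) (by omega)] at hsim
    rw [pvSimX_iff g b n' (by omega) (by omega)] at hsim'
    subst hpe; subst hqe
    exact pv_anti_xpos g n a n' b hsim.1 hsim.2.1 hsim.2.2 hsim'.1 hsim'.2.1 hsim'.2.2 hab
  have pairR : ((PySem.List.pyRange 1 (g+1) 1).filterMap (pvGBxpos g)).Pairwise
      (fun p q => p.1 < q.1) := by
    rw [List.pairwise_filterMap]
    refine (List.Pairwise.and_mem.mp (PySem.List.pairwise_lt_pyRange_one 1 (g+1))).imp ?_
    rintro a b ⟨ha, hb, hab⟩ p hp q hq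
    rw [PySem.List.mem_pyRange_one] at ha hb
    rw [pvGBxpos_iff g a p (by omega)] at hp
    rw [pvGBxpos_iff g b q (by omega)] at hq
    omega
  have ndL := pairL.imp (fun {p q} hlt => (by intro he; subst he; exact lt_irrefl _ hlt :
    p ≠ q))
  have ndR := pairR.imp (fun {p q} hlt => (by intro he; subst he; exact lt_irrefl _ hlt :
    p ≠ q))
  have hperm : ((PySem.List.pyRange 1 (g+1) 1).filterMap (pvGBxpos g)).Perm
      ((PySem.List.pyRange g 0 (-1)).filterMap (pvGA true g)) :=
    (List.perm_ext_iff_of_nodup ndR ndL).mpr (fun p => (memR p).trans (memL p).symm)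
  have e1 := PySem.List.sorted_eq_of_perm_of_pairwise_lt _
    ((PySem.List.pyRange g 0 (-1)).filterMap (pvGA true g)) (fun p : Int × Int => p.1)
    (List.Perm.refl _) pairL
  have e2 := PySem.List.sorted_eq_of_perm_of_pairwise_lt
    ((PySem.List.pyRange g 0 (-1)).filterMap (pvGA true g))
    ((PySem.List.pyRange 1 (g+1) 1).filterMap (pvGBxpos g)) (fun p : Int × Int => p.1)
    hperm pairR
  rw [← e1, e2]

def pvGBxneg (g n : Int) : Option (Int × Int) :=
  if PySem.Int.mod (g - PySem.Int.floordiv (n*(n-1)) 2) n = 0 then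
    (if PySem.Int.floordiv (g - PySem.Int.floordiv (n*(n-1)) 2) n ≤ -n then
      some (n, PySem.Int.floordiv (g - PySem.Int.floordiv (n*(n-1)) 2) n)
    else none)
  else none

theorem pvGBxneg_iff (g n : Int) (p : Int × Int) (hn : 1 ≤ n) :
    pvGBxneg g n = some p ↔ (p.1 = n ∧ p.2 ≤ -n ∧ 2*g = n*(2*p.2 + n - 1)) := by
  unfold pvGBxneg
  constructor
  · intro h
    split_ifs at h with hmod hle
    rw [Option.some.injEq] at h
    subst h
    have hex := pv_fdiv_exact (g - PySem.Int.floordiv (n*(n-1)) 2) n hmod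
    have htri := pv_two_fdiv n
    exact ⟨rfl, hle, by linear_combination -2*hex + htri⟩
  · rintro ⟨hp1, hle, he⟩
    have htri := pv_two_fdiv n
    have hnum : g - PySem.Int.floordiv (n*(n-1)) 2 = n * p.2 := by nlinarith
    rw [hnum, if_pos (pv_mul_fmod n p.2), pv_mul_fdiv n p.2 (by omega),
      if_pos hle, ← hp1]

theorem pvC_xneg_bounds (g n sv : Int) (h1 : 1 ≤ n) (h2 : n ≤ -sv)
    (he : 2*g = n*(2*sv + n - 1)) : -g ≥ n ∧ g ≤ sv := by
  have := pvC_xpos_bounds (-g) n (-sv) h1 (by omega) (by linear_combination -he)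
  omega

theorem pv_events_xneg (g : Int) (hg : g < 0) :
    (PySem.List.pyRange g 0 1).filterMap (pvGA true g)
      = (PySem.List.pyRange 1 (-g+1) 1).filterMap (pvGBxneg g) := by
  have memL : ∀ p : Int × Int, p ∈ (PySem.List.pyRange g 0 1).filterMap (pvGA true g) ↔
      (1 ≤ p.1 ∧ p.1 ≤ -p.2 ∧ 2*g = p.1*(2*p.2 + p.1 - 1)) := by
    intro p
    rw [List.mem_filterMap]
    constructor
    · rintro ⟨sv, hsv, hf⟩
      rw [PySem.List.mem_pyRange_one] at hsv
      unfold pvGA at hf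
      rw [Option.map_eq_some_iff] at hf
      obtain ⟨n, hsim, hp⟩ := hf
      rw [pvSimXneg_iff g sv n (by omega) (by omega)] at hsim
      subst hp
      exact ⟨hsim.1, hsim.2.1, hsim.2.2⟩
    · rintro ⟨h1, h2, h3⟩
      have hb := pvC_xneg_bounds g p.1 p.2 h1 h2 h3
      refine ⟨p.2, PySem.List.mem_pyRange_one.mpr ⟨by omega, by omega⟩, ?_⟩
      unfold pvGA
      rw [Option.map_eq_some_iff]
      exact ⟨p.1, (pvSimXneg_iff g p.2 p.1 (by omega) (by omega)).mpr ⟨h1, h2, h3⟩, rfl⟩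
  have memR : ∀ p : Int × Int, p ∈ (PySem.List.pyRange 1 (-g+1) 1).filterMap (pvGBxneg g) ↔
      (1 ≤ p.1 ∧ p.1 ≤ -p.2 ∧ 2*g = p.1*(2*p.2 + p.1 - 1)) := by
    intro p
    rw [List.mem_filterMap]
    constructor
    · rintro ⟨n, hn, hf⟩
      rw [PySem.List.mem_pyRange_one] at hn
      rw [pvGBxneg_iff g n p (by omega)] at hf
      obtain ⟨hp1, hle, he⟩ := hf
      exact ⟨by omega, by omega, by rw [hp1]; linear_combination he⟩
    · rintro ⟨h1, h2, h3⟩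
      have hb := pvC_xneg_bounds g p.1 p.2 h1 h2 h3
      refine ⟨p.1, PySem.List.mem_pyRange_one.mpr ⟨by omega, by omega⟩, ?_⟩
      exact (pvGBxneg_iff g p.1 p (by omega)).mpr ⟨rfl, by omega, h3⟩
  have pairL : ((PySem.List.pyRange g 0 1).filterMap (pvGA true g)).Pairwise
      (fun p q => p.1 < q.1) := by
    rw [List.pairwise_filterMap]
    refine (List.Pairwise.and_mem.mp (PySem.List.pairwise_lt_pyRange_one g 0)).imp ?_
    rintro a b ⟨ha, hb, hab⟩ p hp q hq
    rw [PySem.List.mem_pyRange_one] at ha hb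
    unfold pvGA at hp hq
    rw [Option.map_eq_some_iff] at hp hq
    obtain ⟨n, hsim, hpe⟩ := hp
    obtain ⟨n', hsim', hqe⟩ := hq
    rw [pvSimXneg_iff g a n (by omega) (by omega)] at hsim
    rw [pvSimXneg_iff g b n' (by omega) (by omega)] at hsim'
    subst hpe; subst hqe
    exact pv_anti_xpos (-g) n (-a) n' (-b) hsim.1 (by omega)
      (by linear_combination -hsim.2.2) hsim'.1 (by omega)
      (by linear_combination -hsim'.2.2) (by omega)
  have pairR : ((PySem.List.pyRange 1 (-g+1) 1).filterMap (pvGBxneg g)).Pairwise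
      (fun p q => p.1 < q.1) := by
    rw [List.pairwise_filterMap]
    refine (List.Pairwise.and_mem.mp (PySem.List.pairwise_lt_pyRange_one 1 (-g+1))).imp ?_
    rintro a b ⟨ha, hb, hab⟩ p hp q hq
    rw [PySem.List.mem_pyRange_one] at ha hb
    rw [pvGBxneg_iff g a p (by omega)] at hp
    rw [pvGBxneg_iff g b q (by omega)] at hq
    omega
  have ndL := pairL.imp (fun {p q} hlt => (by intro he; subst he; exact lt_irrefl _ hlt :
    p ≠ q))
  have ndR := pairR.imp (fun {p q} hlt => (by intro he; subst he; exact lt_irrefl _ hlt :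
    p ≠ q))
  have hperm : ((PySem.List.pyRange 1 (-g+1) 1).filterMap (pvGBxneg g)).Perm
      ((PySem.List.pyRange g 0 1).filterMap (pvGA true g)) :=
    (List.perm_ext_iff_of_nodup ndR ndL).mpr (fun p => (memR p).trans (memL p).symm)
  have e1 := PySem.List.sorted_eq_of_perm_of_pairwise_lt _
    ((PySem.List.pyRange g 0 1).filterMap (pvGA true g)) (fun p : Int × Int => p.1)
    (List.Perm.refl _) pairL
  have e2 := PySem.List.sorted_eq_of_perm_of_pairwise_lt
    ((PySem.List.pyRange g 0 1).filterMap (pvGA true g))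
    ((PySem.List.pyRange 1 (-g+1) 1).filterMap (pvGBxneg g)) (fun p : Int × Int => p.1)
    hperm pairR
  rw [← e1, e2]

def pvGBy (cap g n : Int) : Option (Int × Int) :=
  if PySem.Int.mod (g + PySem.Int.floordiv (n*(n-1)) 2) n = 0 then
    (if PySem.Int.floordiv (g + PySem.Int.floordiv (n*(n-1)) 2) n ≤ cap then
      some (n, PySem.Int.floordiv (g + PySem.Int.floordiv (n*(n-1)) 2) n)
    else none)
  else none

theorem pvGBy_iff (cap g n : Int) (p : Int × Int) (hn : 1 ≤ n) :
    pvGBy cap g n = some p ↔ (p.1 = n ∧ p.2 ≤ cap ∧ 2*g = n*(2*p.2 - n + 1)) := by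
  unfold pvGBy
  constructor
  · intro h
    split_ifs at h with hmod hle
    rw [Option.some.injEq] at h
    subst h
    have hex := pv_fdiv_exact (g + PySem.Int.floordiv (n*(n-1)) 2) n hmod
    have htri := pv_two_fdiv n
    exact ⟨rfl, hle, by linear_combination -2*hex - htri⟩
  · rintro ⟨hp1, hle, he⟩
    have htri := pv_two_fdiv n
    have hnum : g + PySem.Int.floordiv (n*(n-1)) 2 = n * p.2 := by nlinarith
    rw [hnum, if_pos (pv_mul_fmod n p.2), pv_mul_fdiv n p.2 (by omega),
      if_pos hle, ← hp1]

theorem pv_events_y (mi g : Int) (hg : g ≤ 0) (hmig : mi ≤ g) :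
    (PySem.List.pyRange (|mi|+1) (min 0 (g-1)) (-1)).filterMap (pvGA false g)
      = (PySem.List.pyRange (2*(|mi|+1)+1) 0 (-1)).filterMap (pvGBy (|mi|+1) g) := by
  have habs : |mi| = -mi := abs_of_nonpos (by omega)
  have memL : ∀ p : Int × Int,
      p ∈ (PySem.List.pyRange (|mi|+1) (min 0 (g-1)) (-1)).filterMap (pvGA false g) ↔
      (1 ≤ p.1 ∧ p.2 ≤ |mi|+1 ∧ 2*g = p.1*(2*p.2 - p.1 + 1)) := by
    intro p
    rw [List.mem_filterMap]
    constructor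
    · rintro ⟨sv, hsv, hf⟩
      rw [PySem.List.mem_pyRange_neg_one] at hsv
      unfold pvGA at hf
      rw [Option.map_eq_some_iff] at hf
      obtain ⟨n, hsim, hp⟩ := hf
      rw [pvSimY_iff g sv n hg] at hsim
      subst hp
      exact ⟨hsim.1, by omega, hsim.2⟩
    · rintro ⟨h1, h2, h3⟩
      have hlb := pvC_y_lb g p.2 p.1 h1 hg h3
      refine ⟨p.2, PySem.List.mem_pyRange_neg_one.mpr ⟨by omega, by omega⟩, ?_⟩
      unfold pvGA
      rw [Option.map_eq_some_iff]
      exact ⟨p.1, (pvSimY_iff g p.2 p.1 hg).mpr ⟨h1, h3⟩, rfl⟩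
  have memR : ∀ p : Int × Int,
      p ∈ (PySem.List.pyRange (2*(|mi|+1)+1) 0 (-1)).filterMap (pvGBy (|mi|+1) g) ↔
      (1 ≤ p.1 ∧ p.2 ≤ |mi|+1 ∧ 2*g = p.1*(2*p.2 - p.1 + 1)) := by
    intro p
    rw [List.mem_filterMap]
    constructor
    · rintro ⟨n, hn, hf⟩
      rw [PySem.List.mem_pyRange_neg_one] at hn
      rw [pvGBy_iff (|mi|+1) g n p (by omega)] at hf
      obtain ⟨hp1, hle, he⟩ := hf
      exact ⟨by omega, hle, by rw [hp1]; exact he⟩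
    · rintro ⟨h1, h2, h3⟩
      have hub := pvY_n_ub g p.2 p.1 h1 hg h3
      refine ⟨p.1, PySem.List.mem_pyRange_neg_one.mpr ⟨by omega, by omega⟩, ?_⟩
      exact (pvGBy_iff (|mi|+1) g p.1 p h1).mpr ⟨rfl, h2, h3⟩
  have pairL : ((PySem.List.pyRange (|mi|+1) (min 0 (g-1)) (-1)).filterMap
      (pvGA false g)).Pairwise (fun p q => q.1 < p.1) := by
    rw [List.pairwise_filterMap]
    have base : (PySem.List.pyRange (|mi|+1) (min 0 (g-1)) (-1)).Pairwise
        (fun a b => b < a) := by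
      rw [PySem.List.pyRange_neg_one_eq_reverse, List.pairwise_reverse]
      exact PySem.List.pairwise_lt_pyRange_one _ _
    refine (List.Pairwise.and_mem.mp base).imp ?_
    rintro a b ⟨ha, hb, hab⟩ p hp q hq
    unfold pvGA at hp hq
    rw [Option.map_eq_some_iff] at hp hq
    obtain ⟨n, hsim, hpe⟩ := hp
    obtain ⟨n', hsim', hqe⟩ := hq
    rw [pvSimY_iff g a n hg] at hsim
    rw [pvSimY_iff g b n' hg] at hsim'
    subst hpe; subst hqe
    exact pv_mono_y g n a n' b hsim.1 hsim.2 hsim'.1 hsim'.2 hg hab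
  have pairR : ((PySem.List.pyRange (2*(|mi|+1)+1) 0 (-1)).filterMap
      (pvGBy (|mi|+1) g)).Pairwise (fun p q => q.1 < p.1) := by
    rw [List.pairwise_filterMap]
    have base : (PySem.List.pyRange (2*(|mi|+1)+1) 0 (-1)).Pairwise (fun a b => b < a) := by
      rw [PySem.List.pyRange_neg_one_eq_reverse, List.pairwise_reverse]
      exact PySem.List.pairwise_lt_pyRange_one _ _
    refine (List.Pairwise.and_mem.mp base).imp ?_
    rintro a b ⟨ha, hb, hab⟩ p hp q hq
    rw [PySem.List.mem_pyRange_neg_one] at ha hb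
    rw [pvGBy_iff (|mi|+1) g a p (by omega)] at hp
    rw [pvGBy_iff (|mi|+1) g b q (by omega)] at hq
    omega
  have ndL := pairL.imp (fun {p q} hlt => (by intro he; subst he; exact lt_irrefl _ hlt :
    p ≠ q))
  have ndR := pairR.imp (fun {p q} hlt => (by intro he; subst he; exact lt_irrefl _ hlt :
    p ≠ q))
  have hperm : ((PySem.List.pyRange (2*(|mi|+1)+1) 0 (-1)).filterMap (pvGBy (|mi|+1) g)).Perm
      ((PySem.List.pyRange (|mi|+1) (min 0 (g-1)) (-1)).filterMap (pvGA false g)) :=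
    (List.perm_ext_iff_of_nodup ndR ndL).mpr (fun p => (memR p).trans (memL p).symm)
  have e1 := PySem.List.sorted_rev_eq_of_perm_of_pairwise_gt _
    ((PySem.List.pyRange (|mi|+1) (min 0 (g-1)) (-1)).filterMap (pvGA false g))
    (fun p : Int × Int => p.1) (List.Perm.refl _) pairL
  have e2 := PySem.List.sorted_rev_eq_of_perm_of_pairwise_gt
    ((PySem.List.pyRange (|mi|+1) (min 0 (g-1)) (-1)).filterMap (pvGA false g))
    ((PySem.List.pyRange (2*(|mi|+1)+1) 0 (-1)).filterMap (pvGBy (|mi|+1) g))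
    (fun p : Int × Int => p.1) hperm pairR
  rw [← e1, e2]

theorem pv_foldl_opt {α β δ : Type} (g : α → Option β) (f : δ → β → δ) (l : List α) (d : δ) :
    l.foldl (fun d a => match g a with | some b => f d b | none => d) d
      = (l.filterMap g).foldl f d := by
  induction l generalizing d with
  | nil => rfl
  | cons a t ih => cases h : g a <;> simp [h, ih]

theorem pv_foldl_sim (is_x : Bool) (g : Int) (l : List Int)
    (acc : PySem.Dict Int (PySem.Set Int)) :
    l.foldl (fun d sv =>
        match pvSimLoop is_x g (2 * sv.natAbs + 2 * g.natAbs + 3) 0 0 sv with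
        | some n => pvTrack d n sv
        | none => d) acc
      = (l.filterMap (pvGA is_x g)).foldl (fun d p => pvTrack d p.1 p.2) acc := by
  rw [← pv_foldl_opt (pvGA is_x g) (fun d p => pvTrack d p.1 p.2)]
  refine PySem.List.foldl_congr_mem _ _ _ _ ?_
  intro d sv _
  unfold pvGA
  cases pvSimLoop is_x g (2 * sv.natAbs + 2 * g.natAbs + 3) 0 0 sv <;> rfl

theorem pv_foldl_gbx (g : Int) (l : List Int) (acc : PySem.Dict Int (PySem.Set Int)) :
    l.foldl (fun d n =>
        let num := g + PySem.Int.floordiv (n*(n-1)) 2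
        if PySem.Int.mod num n = 0 then
          let v := PySem.Int.floordiv num n
          if n ≤ v then pvTrack d n v else d
        else d) acc
      = (l.filterMap (pvGBxpos g)).foldl (fun d p => pvTrack d p.1 p.2) acc := by
  rw [← pv_foldl_opt (pvGBxpos g) (fun d p => pvTrack d p.1 p.2)]
  refine PySem.List.foldl_congr_mem _ _ _ _ ?_
  intro d n _
  unfold pvGBxpos
  by_cases hmod : PySem.Int.mod (g + PySem.Int.floordiv (n*(n-1)) 2) n = 0
  · by_cases hle : n ≤ PySem.Int.floordiv (g + PySem.Int.floordiv (n*(n-1)) 2) n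
    · simp only [hmod, hle, ite_true]
    · simp only [hmod, hle, ite_true, ite_false]
  · simp only [hmod, ite_false]

theorem pv_foldl_gbxneg (g : Int) (l : List Int) (acc : PySem.Dict Int (PySem.Set Int)) :
    l.foldl (fun d n =>
        let num := g - PySem.Int.floordiv (n*(n-1)) 2
        if PySem.Int.mod num n = 0 then
          let v := PySem.Int.floordiv num n
          if v ≤ -n then pvTrack d n v else d
        else d) acc
      = (l.filterMap (pvGBxneg g)).foldl (fun d p => pvTrack d p.1 p.2) acc := by
  rw [← pv_foldl_opt (pvGBxneg g) (fun d p => pvTrack d p.1 p.2)]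
  refine PySem.List.foldl_congr_mem _ _ _ _ ?_
  intro d n _
  unfold pvGBxneg
  by_cases hmod : PySem.Int.mod (g - PySem.Int.floordiv (n*(n-1)) 2) n = 0
  · by_cases hle : PySem.Int.floordiv (g - PySem.Int.floordiv (n*(n-1)) 2) n ≤ -n
    · simp only [hmod, hle, ite_true]
    · simp only [hmod, hle, ite_true, ite_false]
  · simp only [hmod, ite_false]

theorem pv_foldl_gby (cap g : Int) (l : List Int) (acc : PySem.Dict Int (PySem.Set Int)) :
    l.foldl (fun d n =>
        let num := g + PySem.Int.floordiv (n*(n-1)) 2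
        if PySem.Int.mod num n = 0 then
          let v := PySem.Int.floordiv num n
          if v ≤ cap then pvTrack d n v else d
        else d) acc
      = (l.filterMap (pvGBy cap g)).foldl (fun d p => pvTrack d p.1 p.2) acc := by
  rw [← pv_foldl_opt (pvGBy cap g) (fun d p => pvTrack d p.1 p.2)]
  refine PySem.List.foldl_congr_mem _ _ _ _ ?_
  intro d n _
  unfold pvGBy
  by_cases hmod : PySem.Int.mod (g + PySem.Int.floordiv (n*(n-1)) 2) n = 0
  · by_cases hle : PySem.Int.floordiv (g + PySem.Int.floordiv (n*(n-1)) 2) n ≤ cap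
    · simp only [hmod, hle, ite_true]
    · simp only [hmod, hle, ite_true, ite_false]
  · simp only [hmod, ite_false]

theorem pv_main (minimum maximum : Int) (is_x : Bool) :
    determine_valid_starting_velocities minimum maximum is_x
      = determine_valid_starting_velocities_alt minimum maximum is_x := by
  unfold determine_valid_starting_velocities determine_valid_starting_velocities_alt
  congr 1
  refine PySem.List.foldl_congr_mem _ _ _ _ ?_
  intro acc goal hmem
  have hmin : minimum ≤ goal := (PySem.List.mem_pyRange_one.mp hmem).1
  cases is_x with
  | false =>
    simp only [Bool.false_eq_true, if_false, max_self]
    by_cases hg : goal ≤ 0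
    · rw [if_pos hg]
      rw [pv_foldl_sim, pv_foldl_gby, pv_events_y minimum goal hg (by omega)]
    · rw [if_neg hg, pv_foldl_sim]
      have hnil : (PySem.List.pyRange (|minimum| + 1) (min 0 (goal - 1)) (-1)).filterMap
          (pvGA false goal) = [] := by
        rw [List.filterMap_eq_nil_iff]
        intro sv _
        unfold pvGA
        rw [pvSimY_none goal sv (by omega)]
        rfl
      rw [hnil]
      rfl
  | true =>
    simp only [if_true]
    rcases lt_trichotomy 0 goal with hp | hz | hn
    · rw [if_pos hp, if_pos hp]
      rw [pv_foldl_sim, pv_foldl_gbx, pv_events_xpos goal hp]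
    · rw [if_neg (by omega : ¬ (0 < goal)), if_neg (by omega : ¬ (0 < goal)),
        if_neg (by omega : ¬ (goal < 0))]
      rw [PySem.List.pyRange_one_eq_nil (by omega)]
      rfl
    · rw [if_neg (by omega : ¬ (0 < goal)), if_neg (by omega : ¬ (0 < goal)),
        if_pos hn]
      rw [pv_foldl_sim, pv_foldl_gbxneg, pv_events_xneg goal hn]

-- ===== VERDICT (by name: the statement is the Claim_ definition above) =====
theorem determine_valid_starting_velocities_spec : Claim_equal_determine_valid_starting_velocities := by
  intro minimum maximum is_x _
  unfold Spec_determine_valid_starting_velocities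
  exact pv_main minimum maximum is_x
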